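-- pv_equiv track=rewrite | github.com/ai-kmu/etc | algorithm/2024/0823_2611_Mice_and_Cheese/2335_Minimum_Amount_of_Time_to_Fill_Cups/Yunseok.py | is_able_to_remove_two
-- ===== SOURCE A (Python) =====
-- def is_able_to_remove_two(input_list):
--     removed_idx = [0, 0, 0]
--     able_to_remove_cnt = 0
--     for idx in range(3):
--         if input_list[idx] > 0 and able_to_remove_cnt < 2:
--             able_to_remove_cnt += 1
--             removed_idx[idx] += 1
--     if able_to_remove_cnt == 2:
--         return True, removed_idx
--     else:
--         return False, removed_idx
-- ===== SOURCE B (Python) =====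
-- _TABLE = {
--     0: (False, [0, 0, 0]),
--     1: (False, [0, 0, 1]),
--     2: (False, [0, 1, 0]),
--     3: (True,  [0, 1, 1]),
--     4: (False, [1, 0, 0]),
--     5: (True,  [1, 0, 1]),
--     6: (True,  [1, 1, 0]),
--     7: (True,  [1, 1, 0]),
-- }
--
-- def is_able_to_remove_two(input_list):
--     key = (4 if input_list[0] > 0 else 0) \
--         + (2 if input_list[1] > 0 else 0) \
--         + (1 if input_list[2] > 0 else 0)
--     ok, removed = _TABLE[key]
--     return ok, list(removed)
-- ===== Notes on version B (the rewrite author's own statement) =====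
-- stated objective: alternative
-- what changed: Replaces A's count-and-mark loop over the three cups by a loop-free precomputed 8-entry table indexed by a 3-bit sign mask of the inputs.
-- outside the precondition, e.g. on is_able_to_remove_two([1, 2]): A raises IndexError, B raises IndexError
import Mathlib
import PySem

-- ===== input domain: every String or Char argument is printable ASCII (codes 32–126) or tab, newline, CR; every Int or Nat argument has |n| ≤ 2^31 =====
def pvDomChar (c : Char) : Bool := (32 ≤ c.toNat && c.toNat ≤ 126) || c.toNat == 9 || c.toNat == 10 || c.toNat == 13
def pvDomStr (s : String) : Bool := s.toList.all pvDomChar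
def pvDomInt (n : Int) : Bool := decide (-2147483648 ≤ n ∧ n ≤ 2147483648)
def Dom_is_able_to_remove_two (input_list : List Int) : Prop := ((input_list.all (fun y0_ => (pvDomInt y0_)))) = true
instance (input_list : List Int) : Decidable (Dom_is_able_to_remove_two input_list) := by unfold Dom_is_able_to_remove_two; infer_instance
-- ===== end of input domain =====

-- B replaces A's count-and-mark loop by a loop-free 8-entry table indexed by a 3-bit sign mask (alternative decomposition, same values).


-- ===== PORT A =====
-- for idx in range(3): if input_list[idx] > 0 and cnt < 2: cnt += 1; removed[idx] += 1
-- input_list[idx] ported as pyGetD _ _ 0; inside Pre_ (length ≥ 3) the index is in range, matching Python exactly.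
def is_able_to_remove_two (input_list : List Int) : Bool × List Int :=
  let s := (PySem.List.pyRange 0 3 1).foldl
    (fun (s : List Int × Int) idx =>
      if PySem.List.pyGetD input_list idx 0 > 0 ∧ s.2 < 2 then
        (s.1.set idx.toNat (PySem.List.pyGetD s.1 idx 0 + 1), s.2 + 1)
      else s)
    ([0, 0, 0], 0)
  if s.2 = 2 then (true, s.1) else (false, s.1)

-- ===== PORT B =====
-- the module-level dict _TABLE of Source B, as a PySem.Dict (association list in insertion order)
def pvTable : PySem.Dict Int (Bool × List Int) := PySem.Dict.ofList
  [(0, (false, [0, 0, 0])), (1, (false, [0, 0, 1])), (2, (false, [0, 1, 0])),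
   (3, (true,  [0, 1, 1])), (4, (false, [1, 0, 0])), (5, (true,  [1, 0, 1])),
   (6, (true,  [1, 1, 0])), (7, (true,  [1, 1, 0]))]

-- key = 3-bit sign mask; _TABLE[key]: key is always 0..7 so the KeyError default of getD is unreachable
def is_able_to_remove_two_alt (input_list : List Int) : Bool × List Int :=
  let key : Int := (if PySem.List.pyGetD input_list 0 0 > 0 then 4 else 0)
                 + (if PySem.List.pyGetD input_list 1 0 > 0 then 2 else 0)
                 + (if PySem.List.pyGetD input_list 2 0 > 0 then 1 else 0)
  PySem.Dict.getD pvTable key (false, [])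

-- ===== PRECONDITION & SPEC =====
-- Pre_ excludes lists shorter than 3, on which both Pythons raise IndexError.
def Pre_is_able_to_remove_two (input_list : List Int) : Prop := 3 ≤ input_list.length
instance (input_list : List Int) : Decidable (Pre_is_able_to_remove_two input_list) := by unfold Pre_is_able_to_remove_two; infer_instance
def pvWitness_is_able_to_remove_two : List Int := [1, 0, 2]

def Spec_is_able_to_remove_two (input_list : List Int) (out : Bool × List Int) : Prop := out = is_able_to_remove_two_alt input_list
instance (input_list : List Int) (out : Bool × List Int) : Decidable (Spec_is_able_to_remove_two input_list out) := by unfold Spec_is_able_to_remove_two; infer_instance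

-- ===== CLAIM =====
def Claim_equal_is_able_to_remove_two : Prop := ∀ (input_list : List Int), Dom_is_able_to_remove_two input_list → Pre_is_able_to_remove_two input_list → Spec_is_able_to_remove_two input_list (is_able_to_remove_two input_list)

-- ===== LEMMAS AND PROOFS =====
lemma shape3 (l : List Int) (h : 3 ≤ l.length) :
    ∃ a b c t, l = a :: b :: c :: t := by
  match l, h with
  | a :: b :: c :: t, _ => exact ⟨a, b, c, t, rfl⟩

-- ===== VERDICT =====
theorem is_able_to_remove_two_spec : Claim_equal_is_able_to_remove_two := by
  intro l _ hpre
  obtain ⟨a, b, c, t, rfl⟩ := shape3 l hpre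
  have e0 : PySem.List.pyGetD (a::b::c::t) 0 0 = a := by
    simp [PySem.List.pyGetD, PySem.List.pyGet?, PySem.List.pyIdx?]
    rw [if_pos (by omega)]; simp
  have e1 : PySem.List.pyGetD (a::b::c::t) 1 0 = b := by
    simp [PySem.List.pyGetD, PySem.List.pyGet?, PySem.List.pyIdx?]
    rw [if_pos (by omega)]; simp
  have e2 : PySem.List.pyGetD (a::b::c::t) 2 0 = c := by
    simp [PySem.List.pyGetD, PySem.List.pyGet?, PySem.List.pyIdx?]
    rw [if_pos (by omega)]; simp
  have hr : PySem.List.pyRange 0 3 1 = [0, 1, 2] := by decide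
  unfold Spec_is_able_to_remove_two is_able_to_remove_two is_able_to_remove_two_alt
  rw [hr]
  simp only [List.foldl_cons, List.foldl_nil, e0, e1, e2]
  by_cases ha : (0:Int) < a <;> by_cases hb : (0:Int) < b <;> by_cases hc : (0:Int) < c <;>
    simp [ha, hb, hc] <;> decide
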